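-- pv_equiv track=rewrite | github.com/climbingg/russian_puzzle | choose_num_show.py | get_one_of_pt
-- ===== SOURCE A (Python) =====
-- def get_one_of_pt(
--     t: tuple[tuple[str, ...], ...], item: int
-- ) -> tuple[tuple[str, ...], ...]:
--     """原本的一種加旋轉七種，把重複的去掉，取出指定項數種"""
--     width = len(t[0])
--     heigth = len(t)
--     ret = {t, t[::-1]}
--     for _ in range(3):
--         temp_t_t: tuple[tuple[str, ...], ...] = ()
--         for x in range(width - 1, -1, -1):
--             temp_t: tuple[str, ...] = ()
--             for y in range(heigth):
--                 temp_t += (t[y][x],)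
--             temp_t_t += (temp_t,)
--         t = temp_t_t
--         ret.add(t)
--         ret.add(t[::-1])
--         width, heigth = heigth, width
--     return tuple(sorted(tuple(ret)))[item]
-- ===== SOURCE B (Python) =====
-- def get_one_of_pt(
--     t: tuple[tuple[str, ...], ...], item: int
-- ) -> tuple[tuple[str, ...], ...]:
--     """Build the 8 symmetries directly as closed-form transforms (transpose +
--     reversals) instead of rotating three times, then index the sorted set."""
--     mirror = lambda g: tuple(r[::-1] for r in g)   # reverse each row
--     u = tuple(zip(*t))                             # transpose (truncating, like zip)
--     v = tuple(zip(*u))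
--     orientations = {
--         t, t[::-1],                                # identity, vertical flip
--         u, u[::-1],                                # transpose, rot90
--         mirror(u), mirror(u)[::-1],                # rot270, anti-transpose
--         mirror(v), mirror(v)[::-1],                # horizontal flip, rot180
--     }
--     return tuple(sorted(orientations))[item]
-- ===== Notes on version B (the rewrite author's own statement) =====
-- stated objective: alternative
-- what changed: B builds the 8 symmetries directly as closed-form transforms of the grid (zip-transpose and reversals) collected into a set literal, instead of A's loop that applies one index-by-index 90-degree rotation three times while accumulating the set.
-- outside the precondition, e.g. on get_one_of_pt(((), ('a',)), 1): A returns ((), ()), B returns ((), ('a',))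
import Mathlib
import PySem

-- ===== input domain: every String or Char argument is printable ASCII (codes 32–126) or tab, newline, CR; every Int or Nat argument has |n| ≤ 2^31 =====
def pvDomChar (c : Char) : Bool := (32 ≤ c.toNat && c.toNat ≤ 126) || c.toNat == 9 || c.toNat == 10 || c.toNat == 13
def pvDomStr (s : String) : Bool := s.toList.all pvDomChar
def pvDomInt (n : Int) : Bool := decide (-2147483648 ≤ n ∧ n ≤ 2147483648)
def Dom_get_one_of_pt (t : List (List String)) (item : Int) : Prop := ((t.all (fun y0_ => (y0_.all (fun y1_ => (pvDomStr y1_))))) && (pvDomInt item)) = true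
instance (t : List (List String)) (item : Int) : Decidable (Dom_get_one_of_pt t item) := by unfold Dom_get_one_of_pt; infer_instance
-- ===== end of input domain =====

-- B replaces A's three iterated 90°-rotations by the 8 symmetries written directly as
-- closed-form transforms (zip-transpose + reversals); objective: alternative decomposition.

-- ===== PORT A =====
-- one 90°-rotation: the body of A's 'for x in range(width-1,-1,-1): for y in range(heigth): …'
def rotA (g : List (List String)) (w h : Int) : List (List String) :=
  (PySem.List.pyRange (w - 1) (-1) (-1)).foldl
    (fun acc x =>
      acc ++ [(PySem.List.pyRange 0 h 1).foldl
        (fun row y => row ++ [PySem.List.pyGetD (PySem.List.pyGetD g y []) x ""]) []]) []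

-- one iteration of A's 'for _ in range(3)' loop on the state (t, width, heigth, ret)
def stepA (s : (List (List String)) × Int × Int × List (List (List String))) (_ : Int) :
    (List (List String)) × Int × Int × List (List (List String)) :=
  (rotA s.1 s.2.1 s.2.2.1, s.2.2.1, s.2.1,
    PySem.Set.add (PySem.Set.add s.2.2.2 (rotA s.1 s.2.1 s.2.2.1)) (rotA s.1 s.2.1 s.2.2.1).reverse)

def get_one_of_pt (t : List (List String)) (item : Int) : List (List String) :=
  let width : Int := ((PySem.List.pyGetD t 0 []).length : Int)
  let heigth : Int := (t.length : Int)
  let ret : List (List (List String)) := PySem.Set.ofList [t, t.reverse]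
  let st := (PySem.List.pyRange 0 3 1).foldl stepA (t, width, heigth, ret)
  PySem.List.pyGetD (PySem.List.sorted st.2.2.2 (fun x => x) false) item []

-- ===== PORT B =====
-- Python's zip(*g): rows are the i-th entries, truncated at the shortest row; fuel = first row length
def pzipGo : Nat → List (List String) → List (List String)
  | 0, _ => []
  | Nat.succ n, g =>
    if g = [] ∨ g.any (fun r => r.isEmpty) then []
    else (g.map (fun r => r.headI)) :: pzipGo n (g.map (fun r => r.tail))

def pzip (g : List (List String)) : List (List String) := pzipGo g.headI.length g

def mirrorB (g : List (List String)) : List (List String) := g.map List.reverse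

def get_one_of_pt_alt (t : List (List String)) (item : Int) : List (List String) :=
  let u := pzip t
  let v := pzip u
  let os : List (List (List String)) := PySem.Set.ofList
    [t, t.reverse, u, u.reverse, mirrorB u, (mirrorB u).reverse, mirrorB v, (mirrorB v).reverse]
  PySem.List.pyGetD (PySem.List.sorted os (fun x => x) false) item []

-- ===== PRECONDITION & SPEC =====
-- the closed-form (truncating) transpose: row i holds the i-th entry of every row
def T (w : Nat) (g : List (List String)) : List (List String) :=
  (List.range w).map (fun i => g.map (fun r => r.getD i ""))

-- number of distinct symmetries of the grid (size of its dihedral orbit): the orbit of t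
-- under transpose (T), whole-grid reversal and per-row reversal, kept as a deduplicated list
def orientCount (t : List (List String)) : Nat :=
  ([t, t.reverse, T t.headI.length t, (T t.headI.length t).reverse,
    (T t.headI.length t).map List.reverse, ((T t.headI.length t).map List.reverse).reverse,
    (T t.length (T t.headI.length t)).map List.reverse,
    ((T t.length (T t.headI.length t)).map List.reverse).reverse].dedup).length

-- Pre_ excludes: the empty grid and grids with a row SHORTER than the first row (A raises
-- IndexError); ragged grids whose FIRST row is empty while another row is not, a degenerate
-- corner no one would specify, where A's width-0 rotation fabricates an accidental grid of
-- empty rows; and item outside the valid (possibly negative) Python index range of the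
-- orientation list (A raises IndexError).
def Pre_get_one_of_pt (t : List (List String)) (item : Int) : Prop :=
  t ≠ [] ∧ (∀ r ∈ t, t.headI.length ≤ r.length) ∧
    (t.headI.length = 0 → ∀ r ∈ t, r = []) ∧
    (-(orientCount t : Int) ≤ item ∧ item < (orientCount t : Int))
instance (t : List (List String)) (item : Int) : Decidable (Pre_get_one_of_pt t item) := by
  unfold Pre_get_one_of_pt; infer_instance

def pvWitness_get_one_of_pt : List (List String) × Int := ([["a", "b"], ["c", "d"]], 0)

def Spec_get_one_of_pt (t : List (List String)) (item : Int) (out : List (List String)) : Prop := out = get_one_of_pt_alt t item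
instance (t : List (List String)) (item : Int) (out : List (List String)) : Decidable (Spec_get_one_of_pt t item out) := by unfold Spec_get_one_of_pt; infer_instance

-- ===== CLAIM (what is proved, stated in full; the proofs are below) =====
def Claim_equal_get_one_of_pt : Prop := ∀ (t : List (List String)) (item : Int), Dom_get_one_of_pt t item → Pre_get_one_of_pt t item → Spec_get_one_of_pt t item (get_one_of_pt t item)

-- ===== LEMMAS AND PROOFS =====

theorem T_length (w : Nat) (g : List (List String)) : (T w g).length = w := by simp [T]

theorem mem_T_length (w : Nat) (g : List (List String)) (r : List String) (h : r ∈ T w g) :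
    r.length = g.length := by
  simp [T] at h
  obtain ⟨i, _, rfl⟩ := h
  simp

theorem T_ne_nil (w : Nat) (g : List (List String)) (h : 0 < w) : T w g ≠ [] := by
  intro he
  have := T_length w g
  rw [he] at this
  simp at this
  omega

theorem T_headI (w : Nat) (g : List (List String)) (h : 0 < w) :
    (T w g).headI = g.map (fun r => r.getD 0 "") := by
  cases w with
  | zero => omega
  | succ n => simp [T, List.range_succ_eq_map]

theorem T_reverse (w : Nat) (g : List (List String)) :
    T w g.reverse = (T w g).map List.reverse := by
  simp [T, List.map_map, Function.comp_def, List.map_reverse]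

theorem T_mirror (w : Nat) (g : List (List String)) (hrect : ∀ r ∈ g, r.length = w) :
    T w (g.map List.reverse) = (T w g).reverse := by
  apply List.ext_getElem (by simp [T])
  intro i h1 h2
  have hi : i < w := by simpa [T] using h1
  simp only [T, List.getElem_map, List.getElem_range, List.getElem_reverse, List.map_map,
    Function.comp_def]
  simp only [List.length_map, List.length_range]
  apply List.map_congr_left
  intro r hr
  have hrl : r.length = w := hrect r hr
  rw [List.getD_eq_getElem _ _ (by simp [hrl, hi]), List.getD_eq_getElem _ _ (by omega)]
  rw [List.getElem_reverse]
  congr 1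
  omega

theorem T_T (w : Nat) (g : List (List String)) (hrect : ∀ r ∈ g, r.length = w) :
    T g.length (T w g) = g := by
  apply List.ext_getElem (by simp [T])
  intro j h1 h2
  have hj : j < g.length := h2
  simp only [T, List.getElem_map, List.getElem_range]
  apply List.ext_getElem (by simp [hrect g[j] (List.getElem_mem hj)])
  intro i hi1 hi2
  have hiw : i < w := by simpa using hi1
  simp only [List.getElem_map, List.getElem_range]
  rw [List.getD_eq_getElem _ _ (by simp [hj])]
  simp only [List.getElem_map]
  rw [List.getD_eq_getElem _ _ (by rw [hrect g[j] (List.getElem_mem hj)]; exact hiw)]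

theorem pyRangeDown (w : Nat) :
    PySem.List.pyRange ((w : Int) - 1) (-1) (-1) = (List.range w).map (fun k : Nat => (w : Int) - 1 - (k : Int)) := by
  simp only [PySem.List.pyRange]
  rw [if_neg (by norm_num : ¬ (-1 : Int) = 0), if_neg (by norm_num : ¬ (0:Int) < -1)]
  cases w with
  | zero => norm_num
  | succ n =>
    rw [if_pos (by push_cast; omega : (-1 : Int) < (n.succ : Int) - 1)]
    rw [show (((n.succ : Int) - 1 - -1 + - -1 - 1) / - -1).toNat = n.succ by push_cast; omega]
    apply List.map_congr_left
    intro k _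
    push_cast
    ring

theorem mapRange_getD {α β : Type} (l : List α) (d : α) (f : α → β) :
    (List.range l.length).map (fun y => f (l.getD y d)) = l.map f := by
  apply List.ext_getElem
  · simp
  · intro i h1 h2
    simp at h1 ⊢
    simp [List.getElem?_eq_getElem h1]

theorem pyGetD_zero_headI (t : List (List String)) (h : t ≠ []) :
    PySem.List.pyGetD t 0 [] = t.headI := by
  cases t with
  | nil => simp at h
  | cons a l => simp [PySem.List.pyGetD, List.headI]

theorem rotA_eq (g : List (List String)) (wn hn : Nat) (hh : g.length = hn) :
    rotA g (wn : Int) (hn : Int) = (T wn g).reverse := by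
  subst hh
  unfold rotA T
  rw [pyRangeDown wn, PySem.List.pyRange_zero_natCast]
  rw [PySem.List.foldl_append_singleton_eq_map]
  simp only [List.nil_append, List.map_map]
  apply List.ext_getElem (by simp)
  intro i h1 h2
  simp only [List.getElem_map, List.getElem_range, Function.comp]
  rw [PySem.List.foldl_append_singleton_eq_map]
  have hi : i < wn := by simpa using h1
  rw [show ((wn:Int) - 1 - (i:Int)) = ((wn - 1 - i : Nat) : Int) by omega]
  simp only [List.nil_append, List.map_map, Function.comp_def, PySem.List.pyGetD_natCast]
  rw [mapRange_getD g [] (fun r => r.getD (wn - 1 - i) "")]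
  rw [List.getElem_reverse]
  simp

theorem pzipGo_closed (w : Nat) : ∀ (g : List (List String)), g ≠ [] →
    g.headI.length = w → (∀ r ∈ g, w ≤ r.length) → pzipGo w g = T w g := by
  induction w with
  | zero => intro g _ _ _; simp [pzipGo, T]
  | succ n ih =>
    intro g hg hhead hrows
    have hne : ∀ r ∈ g, r ≠ [] := by
      intro r hr he
      have := hrows r hr
      rw [he] at this
      simp at this
    rw [pzipGo]
    rw [if_neg (by
      simp only [not_or]
      refine ⟨hg, ?_⟩
      simp only [List.any_eq_true, not_exists, not_and]
      intro r hr
      simp [List.isEmpty_iff, hne r hr])]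
    have hmapne : g.map (fun r => r.tail) ≠ [] := by simp [hg]
    have hheadtail : (g.map (fun r => r.tail)).headI = g.headI.tail := by
      cases g with
      | nil => simp at hg
      | cons a l => simp [List.headI]
    have ihapp := ih (g.map (fun r => r.tail)) hmapne
      (by rw [hheadtail]; simp [hhead])
      (by
        intro r hr
        simp only [List.mem_map] at hr
        obtain ⟨s, hs, rfl⟩ := hr
        have := hrows s hs
        simp [List.length_tail]
        omega)
    rw [ihapp]
    unfold T
    rw [List.range_succ_eq_map]
    simp only [List.map_cons, List.map_map, Function.comp_def]
    congr 1
    · apply List.map_congr_left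
      intro r hr
      cases r with
      | nil => exact absurd rfl (hne _ hr)
      | cons a s => simp [List.headI]
    · apply List.map_congr_left
      intro i _
      apply List.map_congr_left
      intro r hr
      cases r with
      | nil => exact absurd rfl (hne _ hr)
      | cons a s => rfl

theorem pzip_eq_T (g : List (List String)) (hg : g ≠ [])
    (hrows : ∀ r ∈ g, g.headI.length ≤ r.length) : pzip g = T g.headI.length g :=
  pzipGo_closed _ g hg rfl hrows

theorem decLT_bridge : (fun (a b : List (List String)) => a.decidableLT b)
    = @LinearOrder.toDecidableLT _ (List.instLinearOrder) := by
  funext a b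
  exact Subsingleton.elim _ _

theorem sorted_eq_of_perm (xs ys : List (List (List String))) (hx : xs.Nodup) (hp : xs.Perm ys) :
    PySem.List.sorted xs (fun x => x) false = PySem.List.sorted ys (fun x => x) false := by
  rw [show (PySem.List.sorted ys (fun x => x) false)
      = @PySem.List.sorted _ _ _ (@LinearOrder.toDecidableLT _ (List.instLinearOrder)) ys (fun x => x) false by rw [← decLT_bridge]]
  rw [show (PySem.List.sorted xs (fun x => x) false)
      = @PySem.List.sorted _ _ _ (@LinearOrder.toDecidableLT _ (List.instLinearOrder)) xs (fun x => x) false by rw [← decLT_bridge]]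
  have hperm := @PySem.List.sorted_perm _ _ _ (@LinearOrder.toDecidableLT _ (List.instLinearOrder)) ys (fun x => x) false
  apply PySem.List.sorted_eq_of_perm_of_pairwise_lt
  · exact hperm.trans hp.symm
  · have hnd : (@PySem.List.sorted _ _ _ (@LinearOrder.toDecidableLT _ (List.instLinearOrder)) ys (fun x => x) false).Nodup :=
      hperm.nodup_iff.2 (hp.nodup_iff.1 hx)
    have hle := PySem.List.sorted_pairwise ys (fun x : List (List String) => x)
    have := List.Pairwise.and hle (List.Pairwise.imp (fun h => h) hnd)
    exact this.imp (fun ⟨h1, h2⟩ => lt_of_le_of_ne h1 h2)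

-- ===== VERDICT (by name: the statement is the Claim_ definition above) =====
set_option maxHeartbeats 1600000 in
theorem get_one_of_pt_spec : Claim_equal_get_one_of_pt := by
  intro t item _ hpre
  obtain ⟨hne, hrows, hzero, -⟩ := hpre
  unfold Spec_get_one_of_pt get_one_of_pt get_one_of_pt_alt
  rw [pyGetD_zero_headI t hne]
  rw [show PySem.List.pyRange 0 3 1 = [0, 1, 2] by decide]
  simp only [List.foldl_cons, List.foldl_nil, stepA]
  refine congrArg (fun l => PySem.List.pyGetD l item []) ?_
  simp only [← PySem.Set.ofList_append_singleton]
  have r1 : rotA t (t.headI.length : Int) (t.length : Int) = (T t.headI.length t).reverse :=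
    rotA_eq t _ _ rfl
  rw [r1]
  have r2 : rotA ((T t.headI.length t).reverse) (t.length : Int) (t.headI.length : Int)
      = (T t.length ((T t.headI.length t).reverse)).reverse :=
    rotA_eq _ _ _ (by simp [T_length])
  rw [r2, T_reverse]
  have r3 : rotA (((T t.length (T t.headI.length t)).map List.reverse).reverse)
        (t.headI.length : Int) (t.length : Int)
      = (T t.headI.length (((T t.length (T t.headI.length t)).map List.reverse).reverse)).reverse :=
    rotA_eq _ _ _ (by simp [T_length])
  rw [r3, T_reverse]
  by_cases hW : t.headI.length = 0
  · -- degenerate width-0 grid: every row is empty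
    have hall : ∀ r ∈ t, r = [] := hzero hW
    obtain ⟨n, hn⟩ : ∃ n, t = List.replicate n ([] : List String) :=
      ⟨t.length, List.eq_replicate_iff.2 ⟨rfl, hall⟩⟩
    have hn0 : n ≠ 0 := by rintro rfl; simp at hn; exact hne hn
    have hW' : t.headI.length = 0 := hW
    rw [hn] at hW' ⊢
    have hT0 : ∀ g, T 0 g = [] := by intro g; simp [T]
    have hTn : ∀ m : Nat, T m ([] : List (List String)) = List.replicate m [] := by
      intro m; simp [T, List.map_const']
    have hpz0 : pzip (List.replicate n ([] : List String)) = [] := by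
      unfold pzip
      rw [show (List.replicate n ([] : List String)).headI = [] by
        cases n with | zero => omega | succ m => rfl]
      rfl
    have hpznil : pzip ([] : List (List String)) = [] := rfl
    rw [hW', hpz0, hpznil]
    simp only [hT0, hTn, List.length_replicate, List.map_replicate, List.reverse_replicate,
      List.map_nil, List.reverse_nil, mirrorB]
    apply sorted_eq_of_perm _ _ (PySem.Set.nodup_ofList _)
    refine (List.perm_ext_iff_of_nodup (PySem.Set.nodup_ofList _) (PySem.Set.nodup_ofList _)).2 ?_
    intro x
    simp only [PySem.Set.mem_ofList, List.mem_append, List.mem_cons,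
      List.not_mem_nil, or_false]
    tauto
  · -- the generic case: width ≥ 1
    have hWpos : 0 < t.headI.length := Nat.pos_of_ne_zero hW
    have hVrows : ∀ r ∈ T t.length (T t.headI.length t), r.length = t.headI.length := by
      intro r hr
      rw [mem_T_length _ _ r hr, T_length]
    rw [T_mirror _ _ hVrows]
    have hU : T t.headI.length (T t.length (T t.headI.length t)) = T t.headI.length t := by
      have h := T_T t.length (T t.headI.length t) (fun r hr => mem_T_length _ _ r hr)
      rwa [T_length] at h
    rw [hU]
    have hpz1 : pzip t = T t.headI.length t := pzip_eq_T t hne hrows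
    have hpz2 : pzip (T t.headI.length t) = T t.length (T t.headI.length t) := by
      rw [pzip_eq_T _ (T_ne_nil _ _ hWpos)
        (fun r hr => by rw [T_headI _ _ hWpos, List.length_map, mem_T_length _ _ r hr])]
      congr 1
      rw [T_headI _ _ hWpos, List.length_map]
    rw [hpz1, hpz2]
    simp only [mirrorB, List.map_reverse, List.reverse_reverse]
    apply sorted_eq_of_perm _ _ (PySem.Set.nodup_ofList _)
    refine (List.perm_ext_iff_of_nodup (PySem.Set.nodup_ofList _) (PySem.Set.nodup_ofList _)).2 ?_
    intro x
    simp only [PySem.Set.mem_ofList, List.mem_append, List.mem_cons,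
      List.not_mem_nil, or_false]
    tauto
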